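-- pv_equiv track=rewrite | github.com/StephenC45/programming-contests | 2022/IMC Coding Contest Division B/robot.py | solve
-- ===== SOURCE A (Python) =====
-- import math
--
-- def solve(N, S):
--
--     u_count = 0
--     d_count = 0
--     l_count = 0
--     r_count = 0
--
--     # Count number of up down left right instructions
--     for character in S:
--         if (character == "U"):
--             u_count += 1
--         elif (character == "D"):
--             d_count += 1
--         elif (character == "L"):
--             l_count += 1
--         elif (character == "R"):
--             r_count += 1
--
--     new_string = S
--     # Remove instructions so that the robot returns to starting point
--     # This means up count == down count, left count == right count.
--     while (r_count > l_count):
--         new_string = new_string.replace('R', '', 1)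
--         r_count = r_count - 1
--     while (l_count > r_count):
--         new_string = new_string.replace('L', '', 1)
--         l_count = l_count - 1
--     while (u_count > d_count):
--         new_string = new_string.replace('U', '', 1)
--         u_count = u_count - 1
--     while (d_count > u_count):
--         new_string = new_string.replace('D', '', 1)
--         d_count = d_count - 1
--
--     n = len(new_string)
--     first_half = ""
--     second_half = ""
--
--     # The string is now balanced, split into two.
--     for i in range(n):
--         if (i < math.ceil(n / 2)):
--             first_half += new_string[i]
--         else:
--             second_half += new_string[i]
--
--     # First half is outbound trip, second half is inbound trip.
--     # Count characters.
--     u_count = 0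
--     d_count = 0
--     l_count = 0
--     r_count = 0
--
--     for character in first_half:
--         if (character == "U"):
--             u_count += 1
--         elif (character == "D"):
--             d_count += 1
--         elif (character == "L"):
--             l_count += 1
--         elif (character == "R"):
--             r_count += 1
--
--     if (u_count > d_count):
--         vertical_distance = u_count
--     else:
--         vertical_distance = d_count
--
--     if (l_count > r_count):
--         horizontal_distance = l_count
--     else:
--         horizontal_distance = r_count
--
--     return vertical_distance + horizontal_distance
-- ===== SOURCE B (Python) =====
-- def solve(N, S):
--     u, d, l, r = S.count('U'), S.count('D'), S.count('L'), S.count('R')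
--     ru, rd, rl, rr = max(0, u - d), max(0, d - u), max(0, l - r), max(0, r - l)
--     trimmed = []
--     for c in S:
--         if c == 'U' and ru > 0:
--             ru -= 1
--         elif c == 'D' and rd > 0:
--             rd -= 1
--         elif c == 'L' and rl > 0:
--             rl -= 1
--         elif c == 'R' and rr > 0:
--             rr -= 1
--         else:
--             trimmed.append(c)
--     half = trimmed[:(len(trimmed) + 1) // 2]
--     return max(half.count('U'), half.count('D')) + max(half.count('L'), half.count('R'))
-- ===== Notes on version B (the rewrite author's own statement) =====
-- stated objective: faster
-- what changed: A trims the path by repeatedly calling str.replace(c, '', 1) in four while-loops (each call rescans the string) and splits it by an index-by-index range loop; B computes the four excess counts once with str.count, removes the leftmost excess characters in a single pass with decrementing counters, slices off the first half, and counts it with list.count.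
import Mathlib
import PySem

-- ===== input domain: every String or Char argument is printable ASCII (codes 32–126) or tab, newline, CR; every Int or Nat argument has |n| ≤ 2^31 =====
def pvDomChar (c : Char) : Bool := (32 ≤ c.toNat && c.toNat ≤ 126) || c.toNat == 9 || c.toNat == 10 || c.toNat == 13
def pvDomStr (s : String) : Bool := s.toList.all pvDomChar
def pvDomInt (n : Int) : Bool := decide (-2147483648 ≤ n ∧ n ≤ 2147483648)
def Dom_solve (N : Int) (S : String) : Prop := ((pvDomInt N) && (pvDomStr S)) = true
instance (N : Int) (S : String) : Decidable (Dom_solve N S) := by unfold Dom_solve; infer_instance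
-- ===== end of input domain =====

-- B replaces A's quadratic repeated `str.replace(c, '', 1)` trimming by one linear pass with
-- excess counters, and A's index-by-index split by a slice; the return value is identical.

-- ===== PORT A =====
-- A's counting loop (the same if/elif chain appears twice in A; one helper for both)
def pvCountLoopA (cs : List Char) (st : Int × Int × Int × Int) : Int × Int × Int × Int :=
  cs.foldl (fun acc c =>
    if c = 'U' then (acc.1 + 1, acc.2.1, acc.2.2.1, acc.2.2.2)
    else if c = 'D' then (acc.1, acc.2.1 + 1, acc.2.2.1, acc.2.2.2)
    else if c = 'L' then (acc.1, acc.2.1, acc.2.2.1 + 1, acc.2.2.2)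
    else if c = 'R' then (acc.1, acc.2.1, acc.2.2.1, acc.2.2.2 + 1)
    else acc) st

-- s.replace(ch, '', 1): hand port, exact for a single-char pattern, empty replacement, count 1
def pvReplace1 : List Char → Char → List Char
  | [], _ => []
  | x :: t, c => if x = c then t else x :: pvReplace1 t c

-- 'while hi_count > lo_count: s = s.replace(ch, "", 1); hi_count -= 1'; returns (s, hi_count)
def pvWhileRemove (s : List Char) (ch : Char) (hi lo : Int) : List Char × Int :=
  if hi > lo then pvWhileRemove (pvReplace1 s ch) ch (hi - 1) lo else (s, hi)
termination_by (hi - lo).toNat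
decreasing_by omega

def solve (N : Int) (S : String) : Int :=
  let cs := S.toList
  let c0 := pvCountLoopA cs (0, 0, 0, 0)
  let p1 := pvWhileRemove cs 'R' c0.2.2.2 c0.2.2.1
  let p2 := pvWhileRemove p1.1 'L' c0.2.2.1 p1.2
  let p3 := pvWhileRemove p2.1 'U' c0.1 c0.2.1
  let p4 := pvWhileRemove p3.1 'D' c0.2.1 p3.2
  let ns := p4.1
  let n : Int := (ns.length : Int)
  -- math.ceil(n / 2) on this nonnegative int equals (n + 1) // 2 (float division is exact here)
  let halves := (PySem.List.pyRange 0 n 1).foldl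
    (fun (fs : List Char × List Char) i =>
      if i < PySem.Int.floordiv (n + 1) 2 then (fs.1 ++ [PySem.List.pyGetD ns i ' '], fs.2)
      else (fs.1, fs.2 ++ [PySem.List.pyGetD ns i ' '])) ([], [])
  let c1 := pvCountLoopA halves.1 (0, 0, 0, 0)
  let vd := if c1.1 > c1.2.1 then c1.1 else c1.2.1
  let hd := if c1.2.2.1 > c1.2.2.2 then c1.2.2.1 else c1.2.2.2
  vd + hd

-- ===== PORT B =====
-- body of B's single trimming loop
def pvStepB (st : Int × Int × Int × Int × List Char) (c : Char) : Int × Int × Int × Int × List Char :=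
  if c = 'U' ∧ 0 < st.1 then (st.1 - 1, st.2.1, st.2.2.1, st.2.2.2.1, st.2.2.2.2)
  else if c = 'D' ∧ 0 < st.2.1 then (st.1, st.2.1 - 1, st.2.2.1, st.2.2.2.1, st.2.2.2.2)
  else if c = 'L' ∧ 0 < st.2.2.1 then (st.1, st.2.1, st.2.2.1 - 1, st.2.2.2.1, st.2.2.2.2)
  else if c = 'R' ∧ 0 < st.2.2.2.1 then (st.1, st.2.1, st.2.2.1, st.2.2.2.1 - 1, st.2.2.2.2)
  else (st.1, st.2.1, st.2.2.1, st.2.2.2.1, st.2.2.2.2 ++ [c])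

def solve_alt (N : Int) (S : String) : Int :=
  let u : Int := (PySem.Str.count S "U" : Int)
  let d : Int := (PySem.Str.count S "D" : Int)
  let l : Int := (PySem.Str.count S "L" : Int)
  let r : Int := (PySem.Str.count S "R" : Int)
  let fin := S.toList.foldl pvStepB
    (max 0 (u - d), max 0 (d - u), max 0 (l - r), max 0 (r - l), ([] : List Char))
  let trimmed := fin.2.2.2.2
  let half := PySem.List.slice trimmed none
    (some (PySem.Int.floordiv ((trimmed.length : Int) + 1) 2))
  max (PySem.List.count half 'U' : Int) (PySem.List.count half 'D' : Int)
    + max (PySem.List.count half 'L' : Int) (PySem.List.count half 'R' : Int)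

-- ===== PRECONDITION & SPEC =====
def Spec_solve (N : Int) (S : String) (out : Int) : Prop := out = solve_alt N S
instance (N : Int) (S : String) (out : Int) : Decidable (Spec_solve N S out) := by unfold Spec_solve; infer_instance

-- ===== CLAIM (what is proved, stated in full; the proofs are below) =====
def Claim_equal_solve : Prop := ∀ (N : Int) (S : String), Dom_solve N S → Spec_solve N S (solve N S)

-- ===== LEMMAS AND PROOFS =====

def pvDec (f : Char → Nat) (c : Char) : Char → Nat := fun x => if x = c then f x - 1 else f x

-- one pass removing the first (f c) occurrences of each character c
def pvOPass (f : Char → Nat) : List Char → List Char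
  | [] => []
  | c :: t => if 0 < f c then pvOPass (pvDec f c) t else c :: pvOPass f t

def pvSingle (c : Char) (k : Nat) : Char → Nat := fun x => if x = c then k else 0

-- the common value both programs compute
def pvSpec (S : String) : Int :=
  let cs := S.toList
  let t := pvOPass (fun x =>
    if x = 'U' then cs.count 'U' - cs.count 'D'
    else if x = 'D' then cs.count 'D' - cs.count 'U'
    else if x = 'L' then cs.count 'L' - cs.count 'R'
    else if x = 'R' then cs.count 'R' - cs.count 'L' else 0) cs
  let h := t.take ((t.length + 1) / 2)
  max (h.count 'U' : Int) (h.count 'D' : Int) + max (h.count 'L' : Int) (h.count 'R' : Int)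

theorem pvCountLoopA_eq (cs : List Char) : ∀ (st : Int × Int × Int × Int),
    pvCountLoopA cs st = (st.1 + (cs.count 'U' : Int), st.2.1 + (cs.count 'D' : Int),
      st.2.2.1 + (cs.count 'L' : Int), st.2.2.2 + (cs.count 'R' : Int)) := by
  induction cs with
  | nil => intro st; simp [pvCountLoopA]
  | cons c t ih =>
    intro st
    simp only [pvCountLoopA, List.foldl_cons] at *
    rw [ih]
    by_cases h1 : c = 'U' <;> by_cases h2 : c = 'D' <;> by_cases h3 : c = 'L' <;>
      by_cases h4 : c = 'R' <;> simp_all <;> ring_nf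

theorem pvOPass_zero (s : List Char) : pvOPass (fun _ => 0) s = s := by
  induction s with
  | nil => rfl
  | cons c t ih => simp [pvOPass, ih]

theorem pvOPass_opass (s : List Char) : ∀ (f g : Char → Nat),
    pvOPass f (pvOPass g s) = pvOPass (fun x => f x + g x) s := by
  induction s with
  | nil => intro f g; rfl
  | cons c t ih =>
    intro f g
    by_cases hg : 0 < g c
    · rw [pvOPass, if_pos hg, ih, pvOPass, if_pos (by omega : 0 < f c + g c)]
      congr 1
      funext x
      simp only [pvDec]
      by_cases hx : x = c <;> simp [hx] <;> omega
    · rw [pvOPass, if_neg hg]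
      by_cases hf : 0 < f c
      · rw [pvOPass, if_pos hf, ih, pvOPass, if_pos (by omega : 0 < f c + g c)]
        congr 1
        funext x
        simp only [pvDec]
        by_cases hx : x = c <;> simp [hx] <;> omega
      · rw [pvOPass, if_neg hf, pvOPass, if_neg (by omega : ¬ 0 < f c + g c), ih]

theorem pvReplace1_eq (s : List Char) (c : Char) :
    pvReplace1 s c = pvOPass (pvSingle c 1) s := by
  induction s with
  | nil => rfl
  | cons x t ih =>
    by_cases hx : x = c
    · rw [pvReplace1, if_pos hx, pvOPass, hx]
      rw [if_pos (by simp [pvSingle])]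
      have : pvDec (pvSingle c 1) c = fun _ => 0 := by
        funext y; by_cases hy : y = c <;> simp [pvDec, pvSingle, hy]
      rw [this, pvOPass_zero]
    · rw [pvReplace1, if_neg hx, pvOPass, if_neg (by simp [pvSingle, hx]), ih]

theorem pvWhileRemove_eq (s : List Char) (c : Char) (hi lo : Int) :
    pvWhileRemove s c hi lo = (pvOPass (pvSingle c (hi - lo).toNat) s, min hi lo) := by
  rw [pvWhileRemove]
  by_cases h : hi > lo
  · rw [if_pos h, pvWhileRemove_eq, pvReplace1_eq, pvOPass_opass]
    have h2 : (fun x => pvSingle c (hi - 1 - lo).toNat x + pvSingle c 1 x)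
        = pvSingle c (hi - lo).toNat := by
      funext y; by_cases hy : y = c <;> simp [pvSingle, hy] <;> omega
    rw [h2]
    congr 1
    omega
  · rw [if_neg h]
    have : (hi - lo).toNat = 0 := by omega
    rw [this]
    have h0 : pvSingle c 0 = fun _ => 0 := by
      funext y; by_cases hy : y = c <;> simp [pvSingle, hy]
    rw [h0, pvOPass_zero]
    simp
    omega
termination_by (hi - lo).toNat
decreasing_by omega

theorem pvBFold (cs : List Char) : ∀ (ru rd rl rr : Int) (acc : List Char),
    0 ≤ ru → 0 ≤ rd → 0 ≤ rl → 0 ≤ rr →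
    (List.foldl pvStepB (ru, rd, rl, rr, acc) cs).2.2.2.2
    = acc ++ pvOPass (fun x => if x = 'U' then ru.toNat else if x = 'D' then rd.toNat
        else if x = 'L' then rl.toNat else if x = 'R' then rr.toNat else 0) cs := by
  induction cs with
  | nil => intro ru rd rl rr acc _ _ _ _; simp [pvOPass]
  | cons c t ih =>
    intro ru rd rl rr acc hru hrd hrl hrr
    rw [List.foldl_cons]
    by_cases hU : c = 'U'
    · subst hU
      by_cases hp : 0 < ru
      · rw [show pvStepB (ru, rd, rl, rr, acc) 'U' = (ru - 1, rd, rl, rr, acc) by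
            simp [pvStepB, hp]]
        rw [ih _ _ _ _ _ (by omega) hrd hrl hrr, pvOPass, if_pos (by simp; omega)]
        congr 2
        funext x
        by_cases hx : x = 'U' <;> simp [pvDec, hx] <;> omega
      · rw [show pvStepB (ru, rd, rl, rr, acc) 'U' = (ru, rd, rl, rr, acc ++ ['U']) by
            simp [pvStepB, hp]]
        rw [ih _ _ _ _ _ hru hrd hrl hrr, pvOPass, if_neg (by simp; omega)]
        simp
    · by_cases hD : c = 'D'
      · subst hD
        by_cases hp : 0 < rd
        · rw [show pvStepB (ru, rd, rl, rr, acc) 'D' = (ru, rd - 1, rl, rr, acc) by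
              simp [pvStepB, hp]]
          rw [ih _ _ _ _ _ hru (by omega) hrl hrr, pvOPass, if_pos (by simp; omega)]
          congr 2
          funext x
          by_cases hx : x = 'D' <;> simp [pvDec, hx] <;> omega
        · rw [show pvStepB (ru, rd, rl, rr, acc) 'D' = (ru, rd, rl, rr, acc ++ ['D']) by
              simp [pvStepB, hp]]
          rw [ih _ _ _ _ _ hru hrd hrl hrr, pvOPass, if_neg (by simp; omega)]
          simp
      · by_cases hL : c = 'L'
        · subst hL
          by_cases hp : 0 < rl
          · rw [show pvStepB (ru, rd, rl, rr, acc) 'L' = (ru, rd, rl - 1, rr, acc) by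
                simp [pvStepB, hp]]
            rw [ih _ _ _ _ _ hru hrd (by omega) hrr, pvOPass, if_pos (by simp; omega)]
            congr 2
            funext x
            by_cases hx : x = 'L' <;> simp [pvDec, hx] <;> omega
          · rw [show pvStepB (ru, rd, rl, rr, acc) 'L' = (ru, rd, rl, rr, acc ++ ['L']) by
                simp [pvStepB, hp]]
            rw [ih _ _ _ _ _ hru hrd hrl hrr, pvOPass, if_neg (by simp; omega)]
            simp
        · by_cases hR : c = 'R'
          · subst hR
            by_cases hp : 0 < rr
            · rw [show pvStepB (ru, rd, rl, rr, acc) 'R' = (ru, rd, rl, rr - 1, acc) by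
                  simp [pvStepB, hp]]
              rw [ih _ _ _ _ _ hru hrd hrl (by omega), pvOPass, if_pos (by simp; omega)]
              congr 2
              funext x
              by_cases hx : x = 'R' <;> simp [pvDec, hx] <;> omega
            · rw [show pvStepB (ru, rd, rl, rr, acc) 'R' = (ru, rd, rl, rr, acc ++ ['R']) by
                  simp [pvStepB, hp]]
              rw [ih _ _ _ _ _ hru hrd hrl hrr, pvOPass, if_neg (by simp; omega)]
              simp
          · rw [show pvStepB (ru, rd, rl, rr, acc) c = (ru, rd, rl, rr, acc ++ [c]) by
                simp [pvStepB, hU, hD, hL, hR]]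
            rw [ih _ _ _ _ _ hru hrd hrl hrr, pvOPass, if_neg (by simp [hU, hD, hL, hR])]
            simp

theorem pvGoSingle (c : Char) : ∀ (l : List Char) (fuel acc : Nat), l.length ≤ fuel →
    PySem.Chars.count.go [c] fuel l acc = acc + l.count c
  | [], fuel, acc, _ => by cases fuel <;> simp [PySem.Chars.count.go]
  | h :: t, fuel, acc, hle => by
    cases fuel with
    | zero => simp at hle
    | succ f =>
      rw [PySem.Chars.count.go]
      by_cases hc : h = c
      · simp [List.isPrefixOf, hc, pvGoSingle c t f (acc + 1) (by simpa using hle)]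
        omega
      · simp [List.isPrefixOf, Ne.symm hc, hc, pvGoSingle c t f acc (by simpa using hle)]

theorem pvStrCount_single (S : String) (c : Char) (w : String) (hw : w.toList = [c]) :
    PySem.Str.count S w = S.toList.count c := by
  rw [PySem.Str.count, hw, PySem.Chars.count, if_neg (by simp),
    pvGoSingle c S.toList S.toList.length 0 le_rfl]
  simp

-- A's split loop: indices below K extend the first half in order, indices ≥ K leave it alone
theorem pvFoldLo (ns : List Char) (K : Int) : ∀ (idx : List Int) (p : List Char × List Char),
    (∀ i ∈ idx, i < K) →
    idx.foldl (fun (fs : List Char × List Char) i =>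
      if i < K then (fs.1 ++ [PySem.List.pyGetD ns i ' '], fs.2)
      else (fs.1, fs.2 ++ [PySem.List.pyGetD ns i ' '])) p
    = (p.1 ++ idx.map (fun i => PySem.List.pyGetD ns i ' '), p.2) := by
  intro idx
  induction idx with
  | nil => intro p _; simp
  | cons i t ih =>
    intro p hmem
    rw [List.foldl_cons, if_pos (hmem i (by simp)), ih _ (fun j hj => hmem j (by simp [hj]))]
    simp

theorem pvFoldHi (ns : List Char) (K : Int) : ∀ (idx : List Int) (p : List Char × List Char),
    (∀ i ∈ idx, ¬ i < K) →
    (idx.foldl (fun (fs : List Char × List Char) i =>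
      if i < K then (fs.1 ++ [PySem.List.pyGetD ns i ' '], fs.2)
      else (fs.1, fs.2 ++ [PySem.List.pyGetD ns i ' '])) p).1
    = p.1 := by
  intro idx
  induction idx with
  | nil => intro p _; simp
  | cons i t ih =>
    intro p hmem
    rw [List.foldl_cons, if_neg (hmem i (by simp)), ih _ (fun j hj => hmem j (by simp [hj]))]

theorem pvMapRangeTake (ns : List Char) : ∀ (k : Nat), k ≤ ns.length →
    (PySem.List.pyRange 0 (k : Int) 1).map (fun i => PySem.List.pyGetD ns i ' ') = ns.take k := by
  intro k
  induction k with
  | zero => intro _; simp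
  | succ m ih =>
    intro hk
    rw [show ((m + 1 : Nat) : Int) = (m : Int) + 1 by push_cast; ring,
      PySem.List.pyRange_one_succ_right (by positivity), List.map_append,
      ih (by omega), List.take_add_one]
    simp [PySem.List.pyGetD_natCast, List.getD, List.getElem?_eq_getElem (by omega : m < ns.length)]

theorem pvSingleSum (a b c d : Nat) :
    (fun x => pvSingle 'D' a x + pvSingle 'U' b x + pvSingle 'L' c x + pvSingle 'R' d x)
    = (fun x => if x = 'U' then b else if x = 'D' then a
        else if x = 'L' then c else if x = 'R' then d else 0) := by
  funext x
  by_cases h1 : x = 'U' <;> by_cases h2 : x = 'D' <;> by_cases h3 : x = 'L' <;>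
    by_cases h4 : x = 'R' <;> simp_all [pvSingle]

theorem solveB_eq (N : Int) (S : String) : solve_alt N S = pvSpec S := by
  unfold solve_alt pvSpec
  simp only [pvStrCount_single S 'U' "U" (by decide), pvStrCount_single S 'D' "D" (by decide),
    pvStrCount_single S 'L' "L" (by decide), pvStrCount_single S 'R' "R" (by decide)]
  rw [pvBFold S.toList _ _ _ _ [] (le_max_left 0 _) (le_max_left 0 _) (le_max_left 0 _)
    (le_max_left 0 _)]
  rw [List.nil_append]
  have hf : (fun x => if x = 'U' then (max 0 ((S.toList.count 'U' : Int) - (S.toList.count 'D' : Int))).toNat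
      else if x = 'D' then (max 0 ((S.toList.count 'D' : Int) - (S.toList.count 'U' : Int))).toNat
      else if x = 'L' then (max 0 ((S.toList.count 'L' : Int) - (S.toList.count 'R' : Int))).toNat
      else if x = 'R' then (max 0 ((S.toList.count 'R' : Int) - (S.toList.count 'L' : Int))).toNat else 0)
      = (fun x => if x = 'U' then S.toList.count 'U' - S.toList.count 'D'
      else if x = 'D' then S.toList.count 'D' - S.toList.count 'U'
      else if x = 'L' then S.toList.count 'L' - S.toList.count 'R'
      else if x = 'R' then S.toList.count 'R' - S.toList.count 'L' else 0) := by
    funext x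
    by_cases h1 : x = 'U' <;> by_cases h2 : x = 'D' <;> by_cases h3 : x = 'L' <;>
      by_cases h4 : x = 'R' <;> simp [h1, h2, h3, h4] <;> omega
  rw [hf]
  set t := pvOPass _ S.toList with ht
  have h2 : PySem.Int.floordiv ((t.length : Int) + 1) 2 = ((t.length + 1) / 2 : Nat) := by
    rw [PySem.Int.floordiv_eq_ediv_of_pos (by norm_num)]
    omega
  rw [h2, PySem.List.slice_to_natCast]
  simp [PySem.List.count_eq]

theorem solveA_eq (N : Int) (S : String) : solve N S = pvSpec S := by
  unfold solve
  simp only [pvCountLoopA_eq, pvWhileRemove_eq, zero_add]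
  rw [pvOPass_opass, pvOPass_opass, pvOPass_opass]
  simp only [pvSingleSum]
  set cU := List.count 'U' S.toList with hcU
  set cD := List.count 'D' S.toList with hcD
  set cL := List.count 'L' S.toList with hcL
  set cR := List.count 'R' S.toList with hcR
  rw [show ((cU : Int) - (cD : Int)).toNat = cU - cD by omega,
    show ((cD : Int) - min (cU : Int) (cD : Int)).toNat = cD - cU by omega,
    show ((cR : Int) - (cL : Int)).toNat = cR - cL by omega,
    show ((cL : Int) - min (cR : Int) (cL : Int)).toNat = cL - cR by omega]
  unfold pvSpec
  simp only [← hcU, ← hcD, ← hcL, ← hcR]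
  set t := pvOPass (fun x => if x = 'U' then cU - cD else if x = 'D' then cD - cU
    else if x = 'L' then cL - cR else if x = 'R' then cR - cL else 0) S.toList with htd
  have hK : PySem.Int.floordiv ((t.length : Int) + 1) 2 = (((t.length + 1) / 2 : Nat) : Int) := by
    rw [PySem.Int.floordiv_eq_ediv_of_pos (by norm_num)]
    omega
  have hkle : (t.length + 1) / 2 ≤ t.length := by omega
  have hsplit : PySem.List.pyRange 0 (t.length : Int) 1
      = PySem.List.pyRange 0 (((t.length + 1) / 2 : Nat) : Int) 1
        ++ PySem.List.pyRange (((t.length + 1) / 2 : Nat) : Int) (t.length : Int) 1 :=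
    PySem.List.pyRange_one_append _ _ _ (by positivity) (by exact_mod_cast hkle)
  have hhalf : ((PySem.List.pyRange 0 (t.length : Int) 1).foldl
      (fun (fs : List Char × List Char) i =>
        if i < PySem.Int.floordiv ((t.length : Int) + 1) 2 then (fs.1 ++ [PySem.List.pyGetD t i ' '], fs.2)
        else (fs.1, fs.2 ++ [PySem.List.pyGetD t i ' '])) ([], [])).1
      = t.take ((t.length + 1) / 2) := by
    rw [hK, hsplit, List.foldl_append,
      pvFoldLo t _ _ _ (fun i hi => ((PySem.List.mem_pyRange_one).1 hi).2),
      pvFoldHi t _ _ _ (fun i hi => by have := (PySem.List.mem_pyRange_one).1 hi; omega),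
      List.nil_append, pvMapRangeTake t _ hkle]
  rw [hhalf]
  split_ifs <;> omega

-- ===== VERDICT (by name: the statement is the Claim_ definition above) =====
theorem solve_spec : Claim_equal_solve := by
  intro N S _
  unfold Spec_solve
  rw [solveA_eq, solveB_eq]
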